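-- pv_equiv track=rewrite | github.com/kadimasum/BridgePy | strings/palindrome_with_question_marks.py | isPossiblePalindrome
-- ===== SOURCE A (Python) =====
-- def isPossiblePalindrome(S):
--
--     n = len(S)
--
--     for i in range(n // 2):
--         if S[i] != '?' and S[n - i - 1] != '?' and S[i] != S[n - i - 1]:
--             return "NO"
--
--     list_S = list(S)
--
--     for i in range(n):
--         if (list_S[i] == '?'):
--             if (list_S[n - i - 1] != '?'):
--                 list_S[i] = list_S[n - i - 1]
--             else:
--                 list_S[i] = list_S[n - i - 1] = 'a'
--
--
--     return "".join(list_S)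
-- ===== SOURCE B (Python) =====
-- def isPossiblePalindrome(S):
--     n = len(S)
--     half = []
--     for a, b in zip(S[:n // 2], reversed(S[(n + 1) // 2:])):
--         if a != '?' and b != '?' and a != b:
--             return "NO"
--         half.append(a if a != '?' else (b if b != '?' else 'a'))
--     if n % 2 == 0:
--         mid = ''
--     else:
--         m = S[n // 2]
--         mid = m if m != '?' else 'a'
--     return ''.join(half) + mid + ''.join(reversed(half))
-- ===== Notes on version B (the rewrite author's own statement) =====
-- stated objective: simpler
-- what changed: A checks the half for conflicts and then mutates a full-length list copy in place (each index reading, and sometimes writing, its mirror cell); B never touches second-half positions: it builds only the first half by merging each (left, mirrored-right) pair from zip, computes the middle character, and returns half + mid + reversed(half), so the result is a palindrome by construction.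
import Mathlib
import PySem

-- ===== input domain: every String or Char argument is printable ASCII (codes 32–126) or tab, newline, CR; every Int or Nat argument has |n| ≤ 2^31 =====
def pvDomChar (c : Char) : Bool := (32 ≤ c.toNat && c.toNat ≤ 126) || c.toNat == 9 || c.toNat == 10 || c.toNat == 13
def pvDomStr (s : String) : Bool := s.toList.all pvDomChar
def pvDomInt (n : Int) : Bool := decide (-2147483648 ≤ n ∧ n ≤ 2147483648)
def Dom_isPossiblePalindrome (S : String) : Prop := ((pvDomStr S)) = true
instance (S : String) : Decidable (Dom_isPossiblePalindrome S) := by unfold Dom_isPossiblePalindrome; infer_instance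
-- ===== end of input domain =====

-- B builds the first half (merging each pair), the middle character, and mirrors the half,
-- instead of A's check-half-then-mutate-a-full-length-list two-pass structure; objective: simpler.

-- ===== PORT A =====
-- loop body of A's second (mutating) for-loop
def pvFillStep (n : Nat) (ls : List Char) (i : Nat) : List Char :=
  if ls.getD i ' ' = '?' then
    if ls.getD (n - i - 1) ' ' ≠ '?' then ls.set i (ls.getD (n - i - 1) ' ')
    else (ls.set i 'a').set (n - i - 1) 'a'
  else ls

def isPossiblePalindrome (S : String) : String :=
  let l := S.toList
  let n := l.length
  if (List.range (n / 2)).any (fun i =>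
      decide (l.getD i ' ' ≠ '?') && decide (l.getD (n - i - 1) ' ' ≠ '?') &&
      decide (l.getD i ' ' ≠ l.getD (n - i - 1) ' ')) then
    "NO"
  else
    String.ofList ((List.range n).foldl (pvFillStep n) l)

-- ===== PORT B =====
-- B's for-loop over zip(S[:n//2], reversed(S[(n+1)//2:])): early 'return "NO"' becomes none,
-- otherwise the accumulated half list
def pvBuildHalf : List (Char × Char) → Option (List Char)
  | [] => some []
  | (a, b) :: rest =>
      if a ≠ '?' ∧ b ≠ '?' ∧ a ≠ b then none
      else (pvBuildHalf rest).map
        (fun h => (if a ≠ '?' then a else if b ≠ '?' then b else 'a') :: h)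

def isPossiblePalindrome_alt (S : String) : String :=
  let l := S.toList
  let n := l.length
  -- S[:n//2] and S[(n+1)//2:] have nonnegative in-range bounds, so slice = take / drop (exact here)
  match pvBuildHalf ((l.take (n / 2)).zip ((l.drop ((n + 1) / 2)).reverse)) with
  | none => "NO"
  | some half =>
      let mid := if n % 2 = 0 then []
                 else [if l.getD (n / 2) ' ' ≠ '?' then l.getD (n / 2) ' ' else 'a']
      String.ofList (half ++ mid ++ half.reverse)

-- ===== PRECONDITION & SPEC =====
def Spec_isPossiblePalindrome (S : String) (out : String) : Prop := out = isPossiblePalindrome_alt S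
instance (S : String) (out : String) : Decidable (Spec_isPossiblePalindrome S out) := by unfold Spec_isPossiblePalindrome; infer_instance

-- ===== CLAIM (what is proved, stated in full; the proofs are below) =====
def Claim_equal_isPossiblePalindrome : Prop := ∀ (S : String), Dom_isPossiblePalindrome S → Spec_isPossiblePalindrome S (isPossiblePalindrome S)

-- ===== LEMMAS AND PROOFS =====

-- the intended final value of position j (characters as A leaves them)
def pvFillAt (l : List Char) (n j : Nat) : Char :=
  if l.getD j ' ' ≠ '?' then l.getD j ' '
  else if l.getD (n - 1 - j) ' ' ≠ '?' then l.getD (n - 1 - j) ' '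
  else 'a'

-- getD of set, in-range index
lemma pvGetD_set (l : List Char) (i j : Nat) (a d : Char) (hi : i < l.length) :
    (l.set i a).getD j d = if i = j then a else l.getD j d := by
  simp only [List.getD_eq_getElem?_getD, List.getElem?_set, hi, if_true]
  split
  · rfl
  · rfl

lemma pvFill_invariant (l : List Char) (k : Nat) (hk : k ≤ l.length) :
    ((List.range k).foldl (pvFillStep l.length) l).length = l.length ∧
    ∀ j, j < l.length →
      ((List.range k).foldl (pvFillStep l.length) l).getD j ' ' =
        if j < k ∨ (l.getD j ' ' = '?' ∧ l.getD (l.length - 1 - j) ' ' = '?' ∧ l.length - 1 - j < k)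
        then pvFillAt l l.length j else l.getD j ' ' := by
  induction k with
  | zero =>
      refine ⟨rfl, fun j hj => ?_⟩
      simp
  | succ k ih =>
      obtain ⟨hlen, hget⟩ := ih (by omega)
      have hkn : k < l.length := hk
      rw [List.range_succ, List.foldl_append, List.foldl_cons, List.foldl_nil]
      set n := l.length with hn
      set R := (List.range k).foldl (pvFillStep n) l with hR
      have hmn : n - 1 - k < n := by omega
      have hmm : n - 1 - (n - 1 - k) = k := by omega
      have hRk : R.getD k ' ' =
          if k < k ∨ (l.getD k ' ' = '?' ∧ l.getD (n - 1 - k) ' ' = '?' ∧ n - 1 - k < k)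
          then pvFillAt l n k else l.getD k ' ' := hget k hkn
      have hRm : R.getD (n - 1 - k) ' ' =
          if n - 1 - k < k then pvFillAt l n (n - 1 - k) else l.getD (n - 1 - k) ' ' := by
        have := hget (n - 1 - k) hmn
        rw [hmm] at this
        simpa using this
      unfold pvFillStep
      have hmk : n - k - 1 = n - 1 - k := by omega
      rw [hmk]
      by_cases hq : l.getD k ' ' = '?'
      · by_cases hb : n - 1 - k < k ∧ l.getD (n - 1 - k) ' ' = '?'
        · -- both '?' and the mirror was processed earlier: R[k] = 'a' already, step skips
          have hFk : pvFillAt l n k = 'a' := by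
            simp only [pvFillAt]
            rw [if_neg (by simpa using hq), if_neg (by simpa using hb.2)]
          have hRka : R.getD k ' ' = 'a' := by
            rw [hRk, if_pos (Or.inr ⟨hq, hb.2, hb.1⟩), hFk]
          rw [hRka]
          simp only [if_neg (by decide : ¬('a' = '?'))]
          refine ⟨hlen, fun j hj => ?_⟩
          rw [hget j hj]
          by_cases h1 : j < k ∨ (l.getD j ' ' = '?' ∧ l.getD (n - 1 - j) ' ' = '?' ∧ n - 1 - j < k)
          · rw [if_pos h1, if_pos (by rcases h1 with h | ⟨a1, a2, a3⟩; exact Or.inl (by omega); exact Or.inr ⟨a1, a2, by omega⟩)]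
          · by_cases h2 : j < k + 1 ∨ (l.getD j ' ' = '?' ∧ l.getD (n - 1 - j) ' ' = '?' ∧ n - 1 - j < k + 1)
            · rw [if_neg h1, if_pos h2]
              have h1a : ¬ j < k := fun hh => h1 (Or.inl hh)
              rcases h2 with h | ⟨a1, a2, a3⟩
              · have hjk : j = k := by omega
                subst hjk
                exact absurd (Or.inr ⟨hq, hb.2, hb.1⟩) h1
              · have h1c : ¬ n - 1 - j < k := fun hh => h1 (Or.inr ⟨a1, a2, hh⟩)
                have hjm : n - 1 - j = k := by omega
                have : j = n - 1 - k := by omega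
                exact absurd (Or.inl (this ▸ hb.1)) h1
            · rw [if_neg h1, if_neg h2]
        · -- R[k] is still '?': the step fires
          have hRkq : R.getD k ' ' = '?' := by
            rw [hRk, if_neg]
            · exact hq
            · rintro (h | ⟨_, b2, b3⟩)
              · omega
              · exact hb ⟨b3, b2⟩
          rw [hRkq, if_pos rfl]
          have hRml : R.getD (n - 1 - k) ' ' = l.getD (n - 1 - k) ' ' := by
            rw [hRm]
            split
            · next hmk' =>
                have hne : ¬(l.getD (n - 1 - k) ' ' = '?') := fun h => hb ⟨hmk', h⟩
                simp only [pvFillAt]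
                rw [if_pos hne]
            · rfl
          by_cases hp : l.getD (n - 1 - k) ' ' = '?'
          · -- both ends '?': set both to 'a'
            have hmge : ¬ (n - 1 - k < k) := fun h => hb ⟨h, hp⟩
            rw [hRml, if_neg (by simpa using hp)]
            have hFk : pvFillAt l n k = 'a' := by
              simp only [pvFillAt]
              rw [if_neg (by simpa using hq), if_neg (by simpa using hp)]
            have hFm : pvFillAt l n (n - 1 - k) = 'a' := by
              simp only [pvFillAt]
              rw [if_neg (by simpa using hp), hmm, if_neg (by simpa using hq)]
            refine ⟨by simp [hlen], fun j hj => ?_⟩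
            rw [pvGetD_set _ _ _ _ _ (by simp [hlen]; omega), pvGetD_set _ _ _ _ _ (by omega)]
            by_cases hjm : n - 1 - k = j
            · rw [if_pos hjm, ← hjm, if_pos (Or.inr ⟨hp, hmm.symm ▸ hq, by omega⟩), hFm]
            · rw [if_neg hjm]
              by_cases hjk : k = j
              · rw [if_pos hjk, ← hjk, if_pos (Or.inl (by omega)), hFk]
              · rw [if_neg hjk, hget j hj]
                by_cases h1 : j < k ∨ (l.getD j ' ' = '?' ∧ l.getD (n - 1 - j) ' ' = '?' ∧ n - 1 - j < k)
                · rw [if_pos h1, if_pos (by rcases h1 with h | ⟨a1, a2, a3⟩; exact Or.inl (by omega); exact Or.inr ⟨a1, a2, by omega⟩)]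
                · by_cases h2 : j < k + 1 ∨ (l.getD j ' ' = '?' ∧ l.getD (n - 1 - j) ' ' = '?' ∧ n - 1 - j < k + 1)
                  · exfalso
                    have h1a : ¬ j < k := fun hh => h1 (Or.inl hh)
                    rcases h2 with h | ⟨a1, a2, a3⟩
                    · exact hjk (by omega)
                    · have h1c : ¬ n - 1 - j < k := fun hh => h1 (Or.inr ⟨a1, a2, hh⟩)
                      have : n - 1 - j = k := by omega
                      exact hjm (by omega)
                  · rw [if_neg h1, if_neg h2]
          · -- mirror holds a letter: copy it to position k
            rw [hRml, if_pos hp]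
            have hFk : pvFillAt l n k = l.getD (n - 1 - k) ' ' := by
              simp only [pvFillAt]
              rw [if_neg (by simpa using hq), if_pos hp]
            refine ⟨by simp [hlen], fun j hj => ?_⟩
            rw [pvGetD_set _ _ _ _ _ (by omega)]
            by_cases hjk : k = j
            · rw [if_pos hjk, ← hjk, if_pos (Or.inl (by omega)), hFk]
            · rw [if_neg hjk, hget j hj]
              by_cases h1 : j < k ∨ (l.getD j ' ' = '?' ∧ l.getD (n - 1 - j) ' ' = '?' ∧ n - 1 - j < k)
              · rw [if_pos h1, if_pos (by rcases h1 with h | ⟨a1, a2, a3⟩; exact Or.inl (by omega); exact Or.inr ⟨a1, a2, by omega⟩)]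
              · by_cases h2 : j < k + 1 ∨ (l.getD j ' ' = '?' ∧ l.getD (n - 1 - j) ' ' = '?' ∧ n - 1 - j < k + 1)
                · exfalso
                  have h1a : ¬ j < k := fun hh => h1 (Or.inl hh)
                  rcases h2 with h | ⟨a1, a2, a3⟩
                  · exact hjk (by omega)
                  · have h1c : ¬ n - 1 - j < k := fun hh => h1 (Or.inr ⟨a1, a2, hh⟩)
                    have hj1 : n - 1 - j = k := by omega
                    have hjm : j = n - 1 - k := by omega
                    exact hp (hjm ▸ a1)
                · rw [if_neg h1, if_neg h2]
      · -- l[k] is a letter: nothing happens at step k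
        have hRkl : R.getD k ' ' = l.getD k ' ' := by
          rw [hRk, if_neg]
          rintro (h | ⟨b1, _, _⟩)
          · omega
          · exact hq b1
        rw [hRkl, if_neg hq]
        refine ⟨hlen, fun j hj => ?_⟩
        rw [hget j hj]
        by_cases h1 : j < k ∨ (l.getD j ' ' = '?' ∧ l.getD (n - 1 - j) ' ' = '?' ∧ n - 1 - j < k)
        · rw [if_pos h1, if_pos (by rcases h1 with h | ⟨a1, a2, a3⟩; exact Or.inl (by omega); exact Or.inr ⟨a1, a2, by omega⟩)]
        · by_cases h2 : j < k + 1 ∨ (l.getD j ' ' = '?' ∧ l.getD (n - 1 - j) ' ' = '?' ∧ n - 1 - j < k + 1)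
          · rw [if_neg h1, if_pos h2]
            have h1a : ¬ j < k := fun hh => h1 (Or.inl hh)
            rcases h2 with h | ⟨a1, a2, a3⟩
            · have hjk : j = k := by omega
              subst hjk
              simp only [pvFillAt]
              rw [if_pos hq]
            · have h1c : ¬ n - 1 - j < k := fun hh => h1 (Or.inr ⟨a1, a2, hh⟩)
              have : n - 1 - j = k := by omega
              exact absurd (this ▸ a2) hq
          · rw [if_neg h1, if_neg h2]

-- closed form of pvBuildHalf: none iff some pair conflicts, else the mapped fill characters
lemma pvBuildHalf_eq (ps : List (Char × Char)) :
    pvBuildHalf ps =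
      if ps.any (fun p => decide (p.1 ≠ '?') && decide (p.2 ≠ '?') && decide (p.1 ≠ p.2)) then none
      else some (ps.map (fun p => if p.1 ≠ '?' then p.1 else if p.2 ≠ '?' then p.2 else 'a')) := by
  induction ps with
  | nil => simp [pvBuildHalf]
  | cons p rest ih =>
      obtain ⟨a, b⟩ := p
      by_cases hc : a ≠ '?' ∧ b ≠ '?' ∧ a ≠ b
      · simp [pvBuildHalf, hc]
      · have hfalse : (decide (a ≠ '?') && decide (b ≠ '?') && decide (a ≠ b)) = false := by
          by_contra hbad
          rw [Bool.not_eq_false] at hbad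
          simp only [Bool.and_eq_true, decide_eq_true_eq] at hbad
          exact hc ⟨hbad.1.1, hbad.1.2, hbad.2⟩
        simp only [pvBuildHalf, if_neg hc, ih, List.any_cons, hfalse, Bool.false_or,
          List.map_cons]
        by_cases hr : (rest.any fun p => decide (p.1 ≠ '?') && decide (p.2 ≠ '?') && decide (p.1 ≠ p.2)) = true
        · rw [if_pos hr, if_pos hr]
          rfl
        · rw [if_neg hr, if_neg hr]
          rfl

-- the zip B iterates over, as a map over indices
lemma pvZip_eq (l : List Char) :
    (l.take (l.length / 2)).zip ((l.drop ((l.length + 1) / 2)).reverse)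
      = (List.range (l.length / 2)).map
          (fun i => (l.getD i ' ', l.getD (l.length - 1 - i) ' ')) := by
  apply List.ext_getElem
  · simp
    omega
  · intro i h1 h2
    have hlt : i < l.length / 2 := by
      simp at h1
      omega
    have hdl : (l.drop ((l.length + 1) / 2)).length = l.length / 2 := by
      simp
      omega
    have hgi : i < l.length := by omega
    have hmi : l.length - 1 - i < l.length := by omega
    simp only [List.getElem_zip, List.getElem_take, List.getElem_map, List.getElem_range,
      List.getElem_reverse, List.getElem_drop]
    have hidx : (l.length + 1) / 2 + ((l.drop ((l.length + 1) / 2)).length - 1 - i) =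
        l.length - 1 - i := by
      rw [hdl]
      omega
    simp only [hidx]
    simp [List.getD_eq_getElem?_getD, List.getElem?_eq_getElem hgi, List.getElem?_eq_getElem hmi]

-- the whole equality, over the underlying character list
lemma pvMain (l : List Char) :
    (if (List.range (l.length / 2)).any (fun i =>
        decide (l.getD i ' ' ≠ '?') && decide (l.getD (l.length - 1 - i) ' ' ≠ '?') &&
        decide (l.getD i ' ' ≠ l.getD (l.length - 1 - i) ' ')) then
      "NO"
    else String.ofList ((List.range l.length).foldl (pvFillStep l.length) l)) =
    (match pvBuildHalf ((l.take (l.length / 2)).zip ((l.drop ((l.length + 1) / 2)).reverse)) with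
     | none => "NO"
     | some half =>
        String.ofList (half ++
          (if l.length % 2 = 0 then []
           else [if l.getD (l.length / 2) ' ' ≠ '?' then l.getD (l.length / 2) ' ' else 'a']) ++
          half.reverse)) := by
  rw [pvZip_eq, pvBuildHalf_eq]
  simp only [List.any_map, List.map_map, Function.comp_def]
  by_cases hC : ((List.range (l.length / 2)).any fun i =>
      decide (l.getD i ' ' ≠ '?') && decide (l.getD (l.length - 1 - i) ' ' ≠ '?') &&
      decide (l.getD i ' ' ≠ l.getD (l.length - 1 - i) ' ')) = true
  · rw [if_pos hC, if_pos hC]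
  · rw [if_neg hC, if_neg hC]
    rw [Bool.not_eq_true] at hC
    -- no conflicting pair: extract the pointwise no-conflict fact
    have hnc : ∀ i, i < l.length / 2 →
        ¬(l.getD i ' ' ≠ '?' ∧ l.getD (l.length - 1 - i) ' ' ≠ '?' ∧
          l.getD i ' ' ≠ l.getD (l.length - 1 - i) ' ') := by
      intro i hi hcon
      have h := List.any_eq_false.mp hC i (List.mem_range.mpr hi)
      simp only [Bool.and_eq_true, decide_eq_true_eq, not_and, Classical.not_not,
        List.getD_eq_getElem?_getD] at h
      simp only [List.getD_eq_getElem?_getD] at hcon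
      exact hcon.2.2 (h ⟨hcon.1, hcon.2.1⟩)
    apply congrArg String.ofList
    obtain ⟨hlen, hget⟩ := pvFill_invariant l l.length le_rfl
    have hFat : ∀ j, j < l.length →
        ((List.range l.length).foldl (pvFillStep l.length) l).getD j ' ' = pvFillAt l l.length j := by
      intro j hj
      rw [hget j hj, if_pos (Or.inl hj)]
    set half := (List.range (l.length / 2)).map
      (fun i => if l.getD i ' ' ≠ '?' then l.getD i ' '
        else if l.getD (l.length - 1 - i) ' ' ≠ '?' then l.getD (l.length - 1 - i) ' ' else 'a')
      with hhalf
    set mid := (if l.length % 2 = 0 then ([] : List Char)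
      else [if l.getD (l.length / 2) ' ' ≠ '?' then l.getD (l.length / 2) ' ' else 'a']) with hmid
    have hhl : half.length = l.length / 2 := by simp [hhalf]
    have hhg : ∀ i (h : i < half.length), half[i] = pvFillAt l l.length i := by
      intro i h
      simp only [hhalf, List.getElem_map, List.getElem_range]
      rfl
    have hml : mid.length = l.length % 2 := by
      by_cases h : l.length % 2 = 0
      · rw [hmid, if_pos h, h]
        rfl
      · rw [hmid, if_neg h]
        simp
        omega
    apply List.ext_getElem
    · simp only [hlen, List.length_append, hhl, hml, List.length_reverse]
      omega
    · intro j h1 h2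
      have hjn : j < l.length := by rwa [hlen] at h1
      have hFj : ((List.range l.length).foldl (pvFillStep l.length) l)[j] = pvFillAt l l.length j := by
        have := hFat j hjn
        rwa [List.getD_eq_getElem?_getD, List.getElem?_eq_getElem h1] at this
      rw [hFj]
      by_cases hj1 : j < l.length / 2
      · rw [List.getElem_append_left (by rw [List.length_append, hhl, hml]; omega),
          List.getElem_append_left (by rw [hhl]; omega : j < half.length)]
        exact (hhg j (by rw [hhl]; omega)).symm
      · by_cases hj2 : j < l.length / 2 + l.length % 2
        · -- the middle position of an odd-length string
          have hodd : l.length % 2 = 1 := by omega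
          have hjm : j = l.length / 2 := by omega
          rw [List.getElem_append_left (by rw [List.length_append, hhl, hml]; omega),
            List.getElem_append_right (by rw [hhl]; omega : half.length ≤ j)]
          have hmide : mid = [if l.getD (l.length / 2) ' ' ≠ '?' then l.getD (l.length / 2) ' ' else 'a'] := by
            rw [hmid, if_neg (by omega)]
          simp only [hmide, List.getElem_singleton]
          have hmir : l.length - 1 - l.length / 2 = l.length / 2 := by omega
          simp only [pvFillAt, hjm, hmir]
          by_cases hq : l.getD (l.length / 2) ' ' ≠ '?'
          · rw [if_pos hq, if_pos hq]
          · rw [if_neg hq, if_neg hq]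
        · -- mirrored second half
          rw [List.getElem_append_right (by rw [List.length_append, hhl, hml]; omega :
            (half ++ mid).length ≤ j), List.getElem_reverse,
            hhg _ (by rw [hhl, List.length_append, hhl, hml]; omega)]
          have hidx : half.length - 1 - (j - (half ++ mid).length) = l.length - 1 - j := by
            rw [hhl, List.length_append, hhl, hml]
            omega
          rw [hidx]
          have hi2 : l.length - 1 - (l.length - 1 - j) = j := by omega
          have hinc : l.length - 1 - j < l.length / 2 := by omega
          have hncj := hnc (l.length - 1 - j) hinc
          simp only [pvFillAt, hi2]
          by_cases hb : l.getD j ' ' = '?'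
          · by_cases ha : l.getD (l.length - 1 - j) ' ' = '?'
            · simp only [List.getD_eq_getElem?_getD] at ha hb
              simp [ha, hb]
            · simp only [List.getD_eq_getElem?_getD] at ha hb
              simp [ha, hb]
          · by_cases ha : l.getD (l.length - 1 - j) ' ' = '?'
            · simp only [List.getD_eq_getElem?_getD] at ha hb
              simp [ha, hb]
            · have heq : l.getD (l.length - 1 - j) ' ' = l.getD j ' ' := by
                by_contra hne
                rw [hi2] at hncj
                exact hncj ⟨ha, hb, hne⟩
              simp only [List.getD_eq_getElem?_getD] at ha hb heq
              simp [ha, hb, heq]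

-- ===== VERDICT (by name: the statement is the Claim_ definition above) =====
theorem isPossiblePalindrome_spec : Claim_equal_isPossiblePalindrome := by
  intro S _
  unfold Spec_isPossiblePalindrome isPossiblePalindrome isPossiblePalindrome_alt
  have hsub : ∀ i : Nat, S.toList.length - i - 1 = S.toList.length - 1 - i := fun i => by omega
  simp only [hsub]
  exact pvMain S.toList
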